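-- pv_equiv track=rewrite | github.com/blueplanet081/cl_parse | lib/tprint_veryold.py | normalize_table
-- ===== SOURCE A (Python) =====
-- from typing import Iterator, List, Any, TextIO
--
-- def normalize_table(table: List[List[Any]], fill: Any = 0) -> List[List[Any]]:
--     ''' 2次ジャグ配列を正方配列に整形した、新しい配列を返す。
--         項目の不足分は[fill]を付加する
--     '''
--     new_table: List[List[Any]] = []
--     maxcount: int = 0
--     for line in table:
--         maxcount = max(maxcount, len(line))
--     for line in table:
--         newline: List[Any] = line + [fill] * (maxcount - len(line))
--         new_table.append(newline)
--     return new_table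
-- ===== SOURCE B (Python) =====
-- from typing import List, Any
--
-- def normalize_table(table: List[List[Any]], fill: Any = 0) -> List[List[Any]]:
--     ''' Column-oriented rewrite: build each padded column, then transpose
--         back to rows with zip(*cols).  When there are no columns at all,
--         zip() would drop the rows, so return a list of empty rows directly. '''
--     maxcount = max(map(len, table), default=0)
--     if maxcount == 0:
--         return [[] for _ in table]
--     cols = [[row[j] if j < len(row) else fill for row in table]
--             for j in range(maxcount)]
--     return [list(t) for t in zip(*cols)]
-- ===== Notes on version B (the rewrite author's own statement) =====
-- stated objective: alternative
-- what changed: Replaces A's row-by-row padding loop with a column-oriented construction: build each padded column, then transpose back to rows with zip(*cols), with an explicit all-rows-empty case.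
import Mathlib
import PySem

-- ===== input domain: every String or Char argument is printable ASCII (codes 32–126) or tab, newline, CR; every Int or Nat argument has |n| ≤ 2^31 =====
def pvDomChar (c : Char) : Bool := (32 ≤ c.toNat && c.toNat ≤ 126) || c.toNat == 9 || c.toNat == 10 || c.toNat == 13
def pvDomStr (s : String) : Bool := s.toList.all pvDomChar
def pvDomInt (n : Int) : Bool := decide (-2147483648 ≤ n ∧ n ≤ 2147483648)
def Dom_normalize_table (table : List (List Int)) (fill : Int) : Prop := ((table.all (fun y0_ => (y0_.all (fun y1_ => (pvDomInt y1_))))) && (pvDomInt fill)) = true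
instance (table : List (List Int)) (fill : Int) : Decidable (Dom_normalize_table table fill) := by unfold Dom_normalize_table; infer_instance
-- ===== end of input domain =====

-- B pads jagged rows by building padded COLUMNS and transposing back (zip(*cols)),
-- instead of A's max-then-pad row loop; same asymptotic cost, alternative algorithm.

-- ===== PORT A =====
-- maxcount = 0; for line in table: maxcount = max(maxcount, len(line))
-- new_table = []; for line: new_table.append(line + [fill]*(maxcount-len(line)))
def normalize_table (table : List (List Int)) (fill : Int) : List (List Int) :=
  let maxcount : Nat := table.foldl (fun acc line => max acc line.length) 0
  table.foldl (fun nt line => nt ++ [line ++ List.replicate (maxcount - line.length) fill]) []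

-- ===== PORT B =====
-- zip(*cols): take the head of every column, recurse on the tails, stop when a
-- column is exhausted (or there are no columns).  Exact port of builtin zip.
def pvZipStar : List (List Int) → List (List Int)
  | [] => []
  | c :: cs =>
    if (c :: cs).any (·.isEmpty) then []
    else ((c :: cs).map (fun l => l.headD 0)) :: pvZipStar ((c :: cs).map (·.tail))
termination_by cols => (cols.headD []).length
decreasing_by
  rename_i h
  simp only [List.any_cons, List.any_eq_true, Bool.or_eq_true] at h
  cases c with
  | nil => simp at h
  | cons x xs => simp

def normalize_table_alt (table : List (List Int)) (fill : Int) : List (List Int) :=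
  -- maxcount = max(map(len, table), default=0)
  let maxcount : Nat := (table.map List.length).foldl max 0
  if maxcount = 0 then table.map (fun _ => ([] : List Int))
  else
    -- cols = [[row[j] if j < len(row) else fill for row in table] for j in range(maxcount)]
    -- row[j] with 0 ≤ j < len(row) is exactly row.getD j fill
    let cols := (List.range maxcount).map
      (fun j => table.map (fun row => if j < row.length then row.getD j fill else fill))
    -- [list(t) for t in zip(*cols)]
    (pvZipStar cols).map (fun t => t)

-- ===== PRECONDITION & SPEC =====
def Spec_normalize_table (table : List (List Int)) (fill : Int) (out : List (List Int)) : Prop := out = normalize_table_alt table fill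
instance (table : List (List Int)) (fill : Int) (out : List (List Int)) : Decidable (Spec_normalize_table table fill out) := by unfold Spec_normalize_table; infer_instance

-- ===== CLAIM (what is proved, stated in full; the proofs are below) =====
def Claim_equal_normalize_table : Prop := ∀ (table : List (List Int)) (fill : Int), Dom_normalize_table table fill → Spec_normalize_table table fill (normalize_table table fill)

-- ===== LEMMAS AND PROOFS =====

-- A's append-accumulator loop is map
theorem pv_foldl_append (table : List (List Int)) (f : List Int → List Int)
    (acc : List (List Int)) :
    table.foldl (fun nt line => nt ++ [f line]) acc = acc ++ table.map f := by
  induction table generalizing acc with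
  | nil => simp
  | cons l t ih => simp [List.foldl_cons, ih]

theorem pv_le_foldl_max (table : List (List Int)) (a : Nat) :
    a ≤ table.foldl (fun acc line => max acc line.length) a := by
  induction table generalizing a with
  | nil => simp
  | cons l t ih => exact le_trans (Nat.le_max_left _ _) (ih _)

theorem pv_mem_le_foldl_max (table : List (List Int)) (a : Nat) (l : List Int)
    (h : l ∈ table) : l.length ≤ table.foldl (fun acc line => max acc line.length) a := by
  induction table generalizing a with
  | nil => simp at h
  | cons x t ih =>
    rcases List.mem_cons.mp h with h1 | h2
    · subst h1; exact le_trans (Nat.le_max_right _ _) (pv_le_foldl_max _ _)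
    · exact ih _ h2

theorem pv_getD_range (l : List Int) (d : Int) :
    (List.range l.length).map (fun j => l.getD j d) = l := by
  apply List.ext_getElem
  · simp
  · intro i h1 h2
    simp_all

-- the cell formula equals indexing into the padded row
theorem pv_cell_eq (line : List Int) (fill : Int) (m j : Nat)
    (hlen : line.length ≤ m) (hj : j < m) :
    (if j < line.length then line.getD j fill else fill)
      = (line ++ List.replicate (m - line.length) fill).getD j 0 := by
  by_cases h : j < line.length
  · rw [if_pos h, List.getD_eq_getElem?_getD, List.getD_eq_getElem?_getD,
        List.getElem?_append_left h, List.getElem?_eq_getElem h]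
    simp
  · have h1 : line.length ≤ j := Nat.le_of_not_lt h
    have h2 : j - line.length < m - line.length := by omega
    rw [if_neg h, List.getD_eq_getElem?_getD, List.getElem?_append_right h1]
    simp [h2]

-- transposing the columns of a rectangular matrix gives back its rows
theorem pv_zip_transpose (P : List (List Int)) (m : Nat) (hm : 0 < m)
    (hrect : ∀ r ∈ P, r.length = m) :
    pvZipStar ((List.range m).map (fun j => P.map (fun r => r.getD j 0))) = P := by
  induction P with
  | nil =>
    obtain ⟨k, rfl⟩ : ∃ k, m = k + 1 := ⟨m - 1, by omega⟩
    rw [List.range_succ_eq_map]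
    simp [pvZipStar]
  | cons r P' ih =>
    obtain ⟨k, hk⟩ : ∃ k, m = k + 1 := ⟨m - 1, by omega⟩
    subst hk
    rw [List.range_succ_eq_map]
    have hr : r.length = k + 1 := hrect r (List.mem_cons_self)
    have hany : (((0 :: (List.range k).map (· + 1)).map
        (fun j => (r :: P').map (fun row => row.getD j 0))).any (·.isEmpty)) = false := by
      simp
    rw [show ((0 :: (List.range k).map (· + 1)).map
        (fun j => (r :: P').map (fun row => row.getD j 0)))
      = ((r.getD 0 0 :: P'.map (fun row => row.getD 0 0)) ::
         ((List.range k).map (· + 1)).map (fun j => (r :: P').map (fun row => row.getD j 0)))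
      from by simp]
    rw [pvZipStar]
    simp only [List.any_cons, List.map_cons] at hany ⊢
    rw [if_neg (by simp_all)]
    congr 1
    · -- heads of the columns are the first row
      have := pv_getD_range r 0
      rw [hr, List.range_succ_eq_map] at this
      simpa [List.map_map, Function.comp] using this
    · -- tails of the columns are the columns of the remaining rows
      have ihm := ih (fun rr hrr => hrect rr (List.mem_cons_of_mem _ hrr))
      rw [List.range_succ_eq_map] at ihm
      simp only [List.map_cons, List.map_map, List.tail_cons
        ] at ihm ⊢
      exact ihm

-- ===== VERDICT (by name: the statement is the Claim_ definition above) =====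
theorem normalize_table_spec : Claim_equal_normalize_table := by
  intro table fill _
  unfold Spec_normalize_table normalize_table normalize_table_alt
  simp only []
  set m := table.foldl (fun acc line => max acc line.length) 0 with hm
  have hmB : (table.map List.length).foldl max 0 = m := by rw [List.foldl_map]
  rw [hmB, pv_foldl_append, List.nil_append]
  by_cases h0 : m = 0
  · rw [if_pos h0]
    apply List.map_congr_left
    intro line hline
    have : line.length = 0 := by
      have := pv_mem_le_foldl_max table 0 line hline
      omega
    have : line = [] := List.eq_nil_of_length_eq_zero this
    simp [this, h0]
  · rw [if_neg h0]
    have hcols : (List.range m).map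
        (fun j => table.map (fun row => if j < row.length then row.getD j fill else fill))
        = (List.range m).map (fun j =>
            (table.map (fun line => line ++ List.replicate (m - line.length) fill)).map
              (fun r => r.getD j 0)) := by
      apply List.map_congr_left
      intro j hj
      rw [List.map_map]
      apply List.map_congr_left
      intro line hline
      exact pv_cell_eq line fill m j (pv_mem_le_foldl_max table 0 line hline)
        (List.mem_range.mp hj)
    rw [hcols, pv_zip_transpose _ m (Nat.pos_of_ne_zero h0)
      (by intro r hr; simp only [List.mem_map] at hr
          obtain ⟨line, hline, rfl⟩ := hr
          have := pv_mem_le_foldl_max table 0 line hline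
          simp; omega)]
    simp
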